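-- pv_equiv track=rewrite | github.com/olegoone/drones_simulator | ros/src/drones_controller/scripts/test_drones_paths.py | to_k_drones
-- ===== SOURCE A (Python) =====
-- def rotate(l, n):
--     return l[n:] + l[:n]
--
-- def to_k_drones(path, k):
--     if k > len(path):
--         raise Exception('the number of drones is larger then the number of cells')
--     paths = []
--     for i in range(k):
--         paths.append(path)
--         path = rotate(path, len(path)//k)
--     return paths
-- ===== SOURCE B (Python) =====
-- def to_k_drones(path, k):
--     if k > len(path):
--         raise Exception('the number of drones is larger then the number of cells')
--     if k <= 0:
--         return []
--     step = len(path) // k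
--     return [path[i * step:] + path[:i * step] for i in range(k)]
-- ===== Notes on version B (the rewrite author's own statement) =====
-- stated objective: simpler
-- what changed: Each of the k paths is computed independently from its rotation offset i*(len(path)//k) with two slices, instead of repeatedly rotating an accumulated path in a loop.
import Mathlib
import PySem

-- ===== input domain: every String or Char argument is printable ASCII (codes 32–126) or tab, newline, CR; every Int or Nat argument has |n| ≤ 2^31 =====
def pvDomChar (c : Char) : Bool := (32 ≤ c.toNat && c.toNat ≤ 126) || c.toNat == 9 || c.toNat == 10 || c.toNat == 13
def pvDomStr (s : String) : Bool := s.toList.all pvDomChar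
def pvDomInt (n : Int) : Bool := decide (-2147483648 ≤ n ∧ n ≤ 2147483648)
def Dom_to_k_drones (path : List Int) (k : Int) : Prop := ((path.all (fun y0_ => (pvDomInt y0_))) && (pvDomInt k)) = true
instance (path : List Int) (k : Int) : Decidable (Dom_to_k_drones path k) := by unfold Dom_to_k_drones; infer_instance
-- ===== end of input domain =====

-- B computes each of the k paths independently from its rotation offset instead of
-- repeatedly rotating an accumulated path (objective: simpler decomposition; same cost).

-- ===== PORT A =====
-- rotate(l, n) = l[n:] + l[:n]
def pyRotate (l : List Int) (n : Int) : List Int :=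
  PySem.List.slice l (some n) none ++ PySem.List.slice l none (some n)

-- loop body: paths.append(path); path = rotate(path, len(path)//k)
def to_k_drones (path : List Int) (k : Int) : List (List Int) :=
  if k > (path.length : Int) then []   -- Python raises Exception here (excluded by Pre_)
  else
    ((PySem.List.pyRange 0 k 1).foldl
      (fun (st : List (List Int) × List Int) _ =>
        (st.1 ++ [st.2], pyRotate st.2 (PySem.Int.floordiv (st.2.length : Int) k)))
      ([], path)).1

-- ===== PORT B =====
def to_k_drones_alt (path : List Int) (k : Int) : List (List Int) :=
  if k > (path.length : Int) then []   -- Python raises Exception here (excluded by Pre_)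
  else if k ≤ 0 then []
  else
    let step := PySem.Int.floordiv (path.length : Int) k
    (PySem.List.pyRange 0 k 1).map (fun i =>
      PySem.List.slice path (some (i * step)) none ++ PySem.List.slice path none (some (i * step)))

-- ===== PRECONDITION & SPEC =====
-- Pre_ excludes exactly the inputs where A raises its Exception: k > len(path)
def Pre_to_k_drones (path : List Int) (k : Int) : Prop := k ≤ (path.length : Int)
instance (path : List Int) (k : Int) : Decidable (Pre_to_k_drones path k) := by
  unfold Pre_to_k_drones; infer_instance

def pvWitness_to_k_drones : List Int × Int := ([1, 2, 3, 4], 2)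

def Spec_to_k_drones (path : List Int) (k : Int) (out : List (List Int)) : Prop := out = to_k_drones_alt path k
instance (path : List Int) (k : Int) (out : List (List Int)) : Decidable (Spec_to_k_drones path k out) := by unfold Spec_to_k_drones; infer_instance

-- ===== CLAIM =====
def Claim_equal_to_k_drones : Prop := ∀ (path : List Int) (k : Int), Dom_to_k_drones path k → Pre_to_k_drones path k → Spec_to_k_drones path k (to_k_drones path k)

-- ===== LEMMAS AND PROOFS =====

-- one step of A's loop, for a nonnegative rotation amount n ≤ length, is List.rotate
lemma pyRotate_eq_rotate (l : List Int) (n : Nat) (hn : n ≤ l.length) :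
    pyRotate l (n : Int) = l.rotate n := by
  simp [pyRotate, PySem.List.slice_from_natCast, PySem.List.slice_to_natCast,
        List.rotate_eq_drop_append_take hn]

-- foldl with a body that ignores the list element is function iteration
lemma foldl_ignore {σ α : Type} (f : σ → σ) (l : List α) (s : σ) :
    l.foldl (fun s _ => f s) s = f^[l.length] s := by
  induction l generalizing s with
  | nil => rfl
  | cons a t ih => simp [List.foldl_cons, ih, Function.iterate_succ_apply]

-- invariant of A's loop after m iterations (k > 0, n = len/k)
lemma loopA_invariant (path : List Int) (k : Int) (hk : 0 < k)
    (n : Nat) (hn : n = path.length / k.toNat) :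
    ∀ (m : Nat), m ≤ k.toNat →
      (fun (st : List (List Int) × List Int) =>
        (st.1 ++ [st.2], pyRotate st.2 (PySem.Int.floordiv (st.2.length : Int) k)))^[m] ([], path)
      = ((List.range m).map (fun j => path.rotate (j * n)), path.rotate (m * n)) := by
  have hnk : k.toNat * n ≤ path.length := by
    rw [hn, Nat.mul_comm]; exact Nat.div_mul_le_self _ _
  intro m hm
  induction m with
  | zero => simp
  | succ m ih =>
    have hm' : m ≤ k.toNat := Nat.le_of_succ_le hm
    rw [Function.iterate_succ_apply', ih hm']
    have hlen : (path.rotate (m * n)).length = path.length := List.length_rotate ..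
    have hk' : (k.toNat : Int) = k := Int.toNat_of_nonneg hk.le
    have hfd : PySem.Int.floordiv ((path.rotate (m * n)).length : Int) k = (n : Int) := by
      rw [hlen, ← hk', PySem.Int.floordiv_natCast, hn]
    have hnle : n ≤ (path.rotate (m * n)).length := by
      rw [hlen]
      calc n ≤ k.toNat * n := Nat.le_mul_of_pos_left n (by omega)
        _ ≤ path.length := hnk
    simp only [hfd, pyRotate_eq_rotate _ n hnle, List.rotate_rotate]
    rw [List.range_succ, Nat.succ_mul]
    simp

-- B's i-th slice pair is the rotation by i*n
lemma sliceB_eq_rotate (path : List Int) (i n : Nat) (h : i * n ≤ path.length) :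
    PySem.List.slice path (some ((i : Int) * (n : Int))) none ++
      PySem.List.slice path none (some ((i : Int) * (n : Int)))
    = path.rotate (i * n) := by
  have : (i : Int) * (n : Int) = ((i * n : Nat) : Int) := by push_cast; ring
  rw [this, PySem.List.slice_from_natCast, PySem.List.slice_to_natCast,
      List.rotate_eq_drop_append_take h]

-- ===== VERDICT =====
theorem to_k_drones_spec : Claim_equal_to_k_drones := by
  intro path k hdom hpre
  unfold Spec_to_k_drones to_k_drones to_k_drones_alt
  have hnr : ¬ k > (path.length : Int) := not_lt.mpr hpre
  rw [if_neg hnr, if_neg hnr]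
  by_cases hk : k ≤ 0
  · rw [if_pos hk, PySem.List.pyRange_one_eq_nil (by omega)]
    rfl
  · rw [not_le] at hk
    rw [if_neg (not_le.mpr hk)]
    set n : Nat := path.length / k.toNat with hn
    have hk' : (k.toNat : Int) = k := Int.toNat_of_nonneg hk.le
    have hnk : k.toNat * n ≤ path.length := by
      rw [hn, Nat.mul_comm]; exact Nat.div_mul_le_self _ _
    have hstep : PySem.Int.floordiv (path.length : Int) k = (n : Int) := by
      rw [← hk', PySem.Int.floordiv_natCast, hn]
    rw [foldl_ignore, PySem.List.length_pyRange_one]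
    simp only [Int.sub_zero]
    rw [loopA_invariant path k hk n hn k.toNat (le_refl _)]
    simp only [hstep, PySem.List.pyRange_one, List.map_map, Int.sub_zero]
    apply List.map_congr_left
    intro j hj
    have hjk : j < k.toNat := List.mem_range.mp hj
    have hjn : j * n ≤ path.length :=
      le_trans (Nat.mul_le_mul_right n hjk.le) hnk
    simp only [Function.comp, Int.zero_add]
    exact (sliceB_eq_rotate path j n hjn).symm
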